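-- pv_equiv track=rewrite | github.com/qiskit-community/qiskit-aqua | qiskit/chemistry/components/variational_forms/uvcc.py | compute_excitation_lists
-- ===== SOURCE A (Python) =====
-- from typing import Optional, List, Tuple, Union, cast
--
-- def compute_excitation_lists(basis: List[int], degrees: List[int]) -> List[List[int]]:
--     """Compute the list with all possible excitation for given orders
--
--     Args:
--         basis: Is a list defining the number of modals per mode. E.g. for a 3 modes system
--             with 4 modals per mode basis = [4,4,4]
--         degrees: degree of excitation to be included (for single and double excitations
--             degrees=[0,1])
--
--     Returns:
--         List of excitation indexes in terms of modes and modals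
--
--     Raises:
--         ValueError: If excitation degree is greater than size of basis
--     """
--
--     excitation_list = []  # type: List[List[int]]
--
--     def combine_modes(modes, tmp, results, degree):
--
--         if degree >= 0:
--             for m, _ in enumerate(modes):
--                 combine_modes(modes[m+1:], tmp+[modes[m]], results, degree-1)
--         else:
--             results.append(tmp)
--
--     def indexes(excitations, results, modes, n, basis):
--         if n >= 0:
--             for j in range(1, basis[modes[n]]):
--                 indexes(excitations + [[modes[n], 0, j]], results, modes, n - 1, basis)
--         else:
--             results.append(excitations)
--
--     for degree in degrees:
--         if degree >= len(basis):
--             raise ValueError('The degree of excitation cannot be '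
--                              'greater than the number of modes')
--
--         combined_modes = []  # type: List
--         modes = []
--         for i in range(len(basis)):
--             modes.append(i)
--
--         combine_modes(modes, [], combined_modes, degree)
--
--         for element in combined_modes:
--             indexes([], excitation_list, element, len(element)-1, basis)
--
--     return excitation_list
-- ===== SOURCE B (Python) =====
-- import itertools
--
-- def compute_excitation_lists(basis, degrees):
--     excitation_list = []
--     n = len(basis)
--     for degree in degrees:
--         if degree >= n:
--             raise ValueError('The degree of excitation cannot be '
--                              'greater than the number of modes')
--         for combo in itertools.combinations(range(n), degree + 1):
--             rev = combo[::-1]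
--             for js in itertools.product(*(range(1, basis[m]) for m in rev)):
--                 excitation_list.append([[m, 0, j] for m, j in zip(rev, js)])
--     return excitation_list
-- ===== Notes on version B (the rewrite author's own statement) =====
-- stated objective: idiomatic
-- what changed: Replaced the two recursive accumulator-mutating helpers (combine_modes, indexes) by composed itertools generators: combinations(range(n), degree+1) for the mode tuples and product of the modal ranges over the reversed tuple, with rows built by zip; Pre_ excludes degrees >= len(basis) (A raises ValueError) and degrees <= -2, where A's single empty excitation is an accident of its recursion base case and B's combinations() raises ValueError on a negative count.
-- outside the precondition, e.g. on compute_excitation_lists([2], [-2]): A returns [[]], B raises ValueError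
import Mathlib
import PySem

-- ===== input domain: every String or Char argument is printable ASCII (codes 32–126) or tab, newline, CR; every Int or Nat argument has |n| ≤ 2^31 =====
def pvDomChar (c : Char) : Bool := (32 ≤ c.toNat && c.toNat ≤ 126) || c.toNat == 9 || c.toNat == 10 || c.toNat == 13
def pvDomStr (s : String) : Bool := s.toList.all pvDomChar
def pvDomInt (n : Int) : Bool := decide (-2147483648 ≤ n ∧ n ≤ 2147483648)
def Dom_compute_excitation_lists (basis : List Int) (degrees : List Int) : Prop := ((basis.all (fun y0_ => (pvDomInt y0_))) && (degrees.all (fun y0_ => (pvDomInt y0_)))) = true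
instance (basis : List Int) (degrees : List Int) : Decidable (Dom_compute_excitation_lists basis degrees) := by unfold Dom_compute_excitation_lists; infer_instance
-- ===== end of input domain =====

-- B replaces A's two mutating recursive helpers by composed combination/product
-- generators (itertools in Python); same values on Pre_, more idiomatic decomposition.

-- ===== PORT A =====
-- combine_modes(modes, tmp, results, degree): the 'for m, _ in enumerate(modes)'
-- loop is the structural recursion on modes (head handled first, then the rest).
def pvCombineA (degree : Int) (modes : List Int) (tmp : List Int)
    (results : List (List Int)) : List (List Int) :=
  if degree ≥ 0 then
    match modes with
    | [] => results
    | x :: rest => pvCombineA degree rest tmp (pvCombineA (degree - 1) rest (tmp ++ [x]) results)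
  else results ++ [tmp]
termination_by modes.length
decreasing_by all_goals simp

-- indexes(excitations, results, modes, n, basis); the list indexings modes[n] and
-- basis[modes[n]] are always in range in A's reachable calls, so pyGetD is exact.
def pvIndexesA (excitations : List (List Int)) (results : List (List (List Int)))
    (modes : List Int) (n : Int) (basis : List Int) : List (List (List Int)) :=
  if h : n ≥ 0 then
    let mn := PySem.List.pyGetD modes n 0
    (PySem.List.pyRange 1 (PySem.List.pyGetD basis mn 0) 1).foldl
      (fun acc j => pvIndexesA (excitations ++ [[mn, 0, j]]) acc modes (n - 1) basis) results
  else results ++ [excitations]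
termination_by (n + 1).toNat
decreasing_by omega

def compute_excitation_lists (basis : List Int) (degrees : List Int) : List (List (List Int)) :=
  degrees.foldl (fun excitation_list degree =>
    if degree ≥ (basis.length : Int) then
      excitation_list  -- Python raises ValueError here; excluded by Pre_
    else
      let modes := PySem.List.pyRange 0 (basis.length : Int) 1
      let combined_modes := pvCombineA degree modes [] []
      combined_modes.foldl (fun acc element =>
        pvIndexesA [] acc element ((element.length : Int) - 1) basis) excitation_list) []

-- ===== PORT B =====
-- itertools.combinations(xs, k) in lexicographic order
def pvCombosB : Nat → List Int → List (List Int)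
  | 0, _ => [[]]
  | _ + 1, [] => []
  | k + 1, x :: rest => (pvCombosB k rest).map (fun c => x :: c) ++ pvCombosB (k + 1) rest

-- itertools.product(*(range(1, basis[m]) for m in ms)); rightmost factor fastest
def pvProdB (basis : List Int) : List Int → List (List Int)
  | [] => [[]]
  | m :: rest => (PySem.List.pyRange 1 (PySem.List.pyGetD basis m 0) 1).flatMap
      (fun j => (pvProdB basis rest).map (fun js => j :: js))

def compute_excitation_lists_alt (basis : List Int) (degrees : List Int) : List (List (List Int)) :=
  degrees.foldl (fun acc degree =>
    if degree ≥ (basis.length : Int) then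
      acc  -- Python raises ValueError here; excluded by Pre_
    else
      acc ++ (pvCombosB (degree + 1).toNat (PySem.List.pyRange 0 (basis.length : Int) 1)).flatMap
        (fun combo =>
          (pvProdB basis combo.reverse).map
            (fun js => List.zipWith (fun m j => [m, 0, j]) combo.reverse js))) []

-- ===== PRECONDITION & SPEC =====
-- Pre_ excludes degrees >= len(basis), where A raises ValueError, and degrees <= -2,
-- where A's single empty excitation is an accident of its recursion base case and
-- B's combinations(range(n), degree+1) raises ValueError on the negative count.
def Pre_compute_excitation_lists (basis : List Int) (degrees : List Int) : Prop :=
  degrees.all (fun d => -1 ≤ d && d < (basis.length : Int)) = true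
instance (basis : List Int) (degrees : List Int) : Decidable (Pre_compute_excitation_lists basis degrees) := by
  unfold Pre_compute_excitation_lists; infer_instance

def pvWitness_compute_excitation_lists : List Int × List Int := ([3, 2], [0, 1])

def Spec_compute_excitation_lists (basis : List Int) (degrees : List Int) (out : List (List (List Int))) : Prop := out = compute_excitation_lists_alt basis degrees
instance (basis : List Int) (degrees : List Int) (out : List (List (List Int))) : Decidable (Spec_compute_excitation_lists basis degrees out) := by unfold Spec_compute_excitation_lists; infer_instance

-- ===== CLAIM =====
def Claim_equal_compute_excitation_lists : Prop := ∀ (basis : List Int) (degrees : List Int), Dom_compute_excitation_lists basis degrees → Pre_compute_excitation_lists basis degrees → Spec_compute_excitation_lists basis degrees (compute_excitation_lists basis degrees)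

-- ===== LEMMAS AND PROOFS =====

-- combine_modes collects, after tmp, the size-(degree+1) combinations in lex order
lemma pvCombineA_eq (modes : List Int) : ∀ (d : Int), 0 ≤ d → ∀ (tmp : List Int) (results : List (List Int)),
    pvCombineA d modes tmp results
      = results ++ (pvCombosB (d.toNat + 1) modes).map (fun c => tmp ++ c) := by
  induction modes with
  | nil => intro d hd tmp results; rw [pvCombineA.eq_def]; simp [show d ≥ 0 from hd, pvCombosB]
  | cons x rest ih =>
    intro d hd tmp results
    rw [pvCombineA.eq_def]
    simp only [if_pos (show d ≥ 0 from hd)]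
    have hinner : pvCombineA (d - 1) rest (tmp ++ [x]) results
        = results ++ (pvCombosB d.toNat rest).map (fun c => (tmp ++ [x]) ++ c) := by
      by_cases h1 : 0 ≤ d - 1
      · have h := ih (d - 1) h1 (tmp ++ [x]) results
        rw [show (d - 1).toNat + 1 = d.toNat from by omega] at h
        exact h
      · have hd0 : d = 0 := by omega
        subst hd0
        rw [pvCombineA.eq_def]
        simp [pvCombosB]
    rw [hinner, ih d hd, List.append_assoc]
    congr 1
    have : pvCombosB (d.toNat + 1) (x :: rest)
        = (pvCombosB d.toNat rest).map (fun c => x :: c) ++ pvCombosB (d.toNat + 1) rest := rfl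
    rw [this]
    simp only [List.map_append, List.map_map]
    congr 1
    apply List.map_congr_left
    intro c _
    simp

-- indexes walks the first k modes back-to-front, modal indices product-style
lemma pvIndexesA_eq (basis element : List Int) : ∀ (k : Nat), k ≤ element.length →
    ∀ (exc : List (List Int)) (results : List (List (List Int))),
    pvIndexesA exc results element ((k : Int) - 1) basis
      = results ++ (pvProdB basis ((element.take k).reverse)).map
          (fun js => exc ++ List.zipWith (fun m j => [m, 0, j]) ((element.take k).reverse) js) := by
  intro k
  induction k with
  | zero =>
    intro _ exc results
    rw [pvIndexesA]
    simp [pvProdB]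
  | succ k ih =>
    intro hk exc results
    have hklt : k < element.length := by omega
    rw [pvIndexesA]
    have hge : ((k + 1 : Nat) : Int) - 1 ≥ 0 := by push_cast; omega
    simp only [dif_pos hge]
    have hmn : PySem.List.pyGetD element (((k + 1 : Nat) : Int) - 1) 0 = element[k] := by
      have h : (((k + 1 : Nat) : Int) - 1) = ((k : Nat) : Int) := by push_cast; ring
      rw [h, PySem.List.pyGetD_natCast, List.getD_eq_getElem?_getD, List.getElem?_eq_getElem hklt]
      rfl
    have hn1 : (((k + 1 : Nat) : Int) - 1) - 1 = (k : Int) - 1 := by push_cast; ring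
    rw [hmn]
    simp only [hn1]
    have hbody : ∀ (acc : List (List (List Int))), ∀ j ∈ PySem.List.pyRange 1 (PySem.List.pyGetD basis element[k] 0) 1,
        pvIndexesA (exc ++ [[element[k], 0, j]]) acc element ((k : Int) - 1) basis
          = acc ++ (pvProdB basis ((element.take k).reverse)).map
              (fun js => (exc ++ [[element[k], 0, j]]) ++
                List.zipWith (fun m j => [m, 0, j]) ((element.take k).reverse) js) := by
      intro acc j _
      exact ih (by omega) (exc ++ [[element[k], 0, j]]) acc
    rw [PySem.List.foldl_congr_mem _ _ _ _ hbody,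
        PySem.List.foldl_append_eq_flatMap]
    have htake : (element.take (k + 1)).reverse = element[k] :: (element.take k).reverse := by
      rw [List.take_add_one, List.getElem?_eq_getElem hklt]
      simp
    rw [htake]
    have hprod : pvProdB basis (element[k] :: (element.take k).reverse)
        = (PySem.List.pyRange 1 (PySem.List.pyGetD basis element[k] 0) 1).flatMap
            (fun j => (pvProdB basis ((element.take k).reverse)).map (fun js => j :: js)) := rfl
    rw [hprod]
    simp [List.map_flatMap, List.map_map, Function.comp_def]

-- the per-degree loop bodies of A and B agree whenever -1 <= degree < len(basis)
lemma pvBody_eq (basis : List Int) (degree : Int) (hneg : -1 ≤ degree)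
    (hd : degree < (basis.length : Int)) (acc : List (List (List Int))) :
    (if degree ≥ (basis.length : Int) then acc
     else
       (pvCombineA degree (PySem.List.pyRange 0 (basis.length : Int) 1) [] []).foldl
         (fun a element => pvIndexesA [] a element ((element.length : Int) - 1) basis) acc)
    = (if degree ≥ (basis.length : Int) then acc
       else
         acc ++ (pvCombosB (degree + 1).toNat (PySem.List.pyRange 0 (basis.length : Int) 1)).flatMap
           (fun combo =>
             (pvProdB basis combo.reverse).map
               (fun js => List.zipWith (fun m j => [m, 0, j]) combo.reverse js))) := by
  rw [if_neg (by omega), if_neg (by omega)]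
  by_cases hnegd : degree < 0
  · have h1 : degree = -1 := by omega
    subst h1
    rw [pvCombineA.eq_def, if_neg (by omega)]
    simp only [List.nil_append, List.foldl_cons, List.foldl_nil]
    rw [pvIndexesA]
    norm_num [pvCombosB, pvProdB]
  · have h0 : 0 ≤ degree := by omega
    rw [pvCombineA_eq _ degree h0 [] []]
    simp only [List.nil_append, List.map_id']
    have hfold : ∀ (a : List (List (List Int))),
        ∀ element ∈ pvCombosB (degree.toNat + 1) (PySem.List.pyRange 0 (basis.length : Int) 1),
        pvIndexesA [] a element ((element.length : Int) - 1) basis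
          = a ++ (pvProdB basis element.reverse).map
              (fun js => List.zipWith (fun m j => [m, 0, j]) element.reverse js) := by
      intro a element _
      have h := pvIndexesA_eq basis element element.length (le_refl _) [] a
      rw [List.take_length] at h
      simpa using h
    rw [PySem.List.foldl_congr_mem _ _ _ _ hfold,
        PySem.List.foldl_append_eq_flatMap,
        show (degree + 1).toNat = degree.toNat + 1 from by omega]

-- ===== VERDICT =====
theorem compute_excitation_lists_spec : Claim_equal_compute_excitation_lists := by
  intro basis degrees _ hpre
  unfold Pre_compute_excitation_lists at hpre
  simp only [List.all_eq_true, Bool.and_eq_true, decide_eq_true_eq] at hpre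
  unfold Spec_compute_excitation_lists compute_excitation_lists compute_excitation_lists_alt
  exact PySem.List.foldl_congr_mem _ _ _ _ (fun acc degree hmem =>
    pvBody_eq basis degree (hpre degree hmem).1 (hpre degree hmem).2 acc)
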